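-- pv_equiv track=rewrite | github.com/sisasoto/-Generador-Derivacion-y-Arboles-Sintacticos-CFG | proyecto_cfg/modelo/gramatica.py | _tokenizar_rhs
-- ===== SOURCE A (Python) =====
-- def _tokenizar_rhs(rhs: str, numero_linea: int) -> list[str]:
--     tokens: list[str] = []
--     i = 0
--     while i < len(rhs):
--         c = rhs[i]
--         if c == "'":
--             j = rhs.find("'", i + 1) #busca comillas simples para identificar terminales. Si no encuentra una comilla de cierre, lanza error.
--             if j == -1:
--                 raise ValueError(
--                     f"Línea {numero_linea}: comilla sin cerrar en '{rhs}'"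
--                 )
--             tokens.append(rhs[i + 1:j])
--             i = j + 1
--         elif c == " ":
--             i += 1
--         else:
--             j = i
--             while j < len(rhs) and rhs[j] not in (" ", "'"):
--                 j += 1
--             tokens.append(rhs[i:j]) #Agrega el token encontrado a la lista. Un token es una secuencia de caracteres sin espacios ni comillas.
--             i = j
--     return tokens
-- ===== SOURCE B (Python) =====
-- def _tokenizar_rhs(rhs: str, numero_linea: int) -> list[str]:
--     # Single left-to-right state machine: accumulate the current quoted terminal
--     # or symbol run character by character, flushing on delimiters.
--     tokens: list[str] = []
--     word = None    # current symbol run, or None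
--     quote = None   # current quoted-terminal content, or None
--     for c in rhs:
--         if quote is not None:
--             if c == "'":
--                 tokens.append(quote)
--                 quote = None
--             else:
--                 quote += c
--         elif c == "'":
--             if word is not None:
--                 tokens.append(word)
--                 word = None
--             quote = ""
--         elif c == " ":
--             if word is not None:
--                 tokens.append(word)
--                 word = None
--         else:
--             word = (word or "") + c
--     if quote is not None:
--         raise ValueError(f"Línea {numero_linea}: comilla sin cerrar en '{rhs}'")
--     if word is not None:
--         tokens.append(word)
--     return tokens
-- ===== Notes on version B (the rewrite author's own statement) =====
-- stated objective: alternative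
-- what changed: Replaced A's index-based while loop with inner find/scan and slicing by a single-pass state machine that accumulates the current quoted terminal or symbol run character by character and flushes on delimiters (and at end of string), detecting an unclosed quote only at the end.
import Mathlib
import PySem

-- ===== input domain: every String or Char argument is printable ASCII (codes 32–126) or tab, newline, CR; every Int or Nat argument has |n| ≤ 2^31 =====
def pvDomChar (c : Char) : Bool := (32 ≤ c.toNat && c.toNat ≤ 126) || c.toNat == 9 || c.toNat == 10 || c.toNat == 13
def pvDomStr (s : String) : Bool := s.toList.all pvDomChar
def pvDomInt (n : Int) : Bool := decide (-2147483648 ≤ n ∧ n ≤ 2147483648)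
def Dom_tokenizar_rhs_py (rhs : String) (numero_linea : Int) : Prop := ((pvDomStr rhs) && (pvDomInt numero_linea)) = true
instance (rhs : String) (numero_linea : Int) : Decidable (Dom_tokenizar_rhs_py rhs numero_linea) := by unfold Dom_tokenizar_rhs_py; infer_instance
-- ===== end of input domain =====

-- B is an alternative single-pass state machine (accumulating character by character with an
-- end-of-string flush) instead of A's index jumps with inner find/scan; return value equivalence only.

-- ===== PORT A =====
-- A's while loop over the index i, transliterated as structural recursion on the suffix of the
-- character list: rhs.find("'", i+1) / the inner `while j` scan become takeWhile/dropWhile on the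
-- suffix, which compute the same slice rhs[i+1:j] resp. rhs[i:j] and the same next position.
def tokAuxA : List Char → List String → List String
  | [], tokens => tokens
  | c :: rest, tokens =>
    if c = '\'' then
      -- j = rhs.find("'", i+1); seg = rhs[i+1:j]; i = j+1
      match h : rest.dropWhile (· ≠ '\'') with
      | [] => tokens        -- j == -1: Python raises ValueError (excluded by Pre_)
      | _ :: r => tokAuxA r (tokens ++ [String.mk (rest.takeWhile (· ≠ '\''))])
    else if c = ' ' then
      tokAuxA rest tokens
    else
      -- inner while: j advances past non-space non-quote chars; token = rhs[i:j]
      tokAuxA ((c :: rest).dropWhile (fun ch => ch ≠ ' ' && ch ≠ '\''))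
        (tokens ++ [String.mk ((c :: rest).takeWhile (fun ch => ch ≠ ' ' && ch ≠ '\''))])
termination_by l => l.length
decreasing_by
  · have h1 := List.length_dropWhile_le (p := (· ≠ '\'')) (l := rest)
    rw [h] at h1; simp at h1 ⊢; omega
  · simp
  · have hc : (fun ch => ch ≠ ' ' && ch ≠ '\'') c = true := by
      simp; constructor <;> simpa using ‹_›
    have h1 := List.length_dropWhile_le (p := (fun ch => ch ≠ ' ' && ch ≠ '\'')) (l := rest)
    simp only [List.dropWhile_cons, hc, if_true]
    simp at h1 ⊢; omega

def tokenizar_rhs_py (rhs : String) (numero_linea : Int) : List String :=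
  tokAuxA rhs.toList []

-- ===== PORT B =====
-- state: (tokens, current symbol run or none, current quoted content or none)
def tokStepB (st : List String × Option (List Char) × Option (List Char)) (c : Char) :
    List String × Option (List Char) × Option (List Char) :=
  match st with
  | (tokens, word, quote) =>
    match quote with
    | some q => if c = '\'' then (tokens ++ [String.mk q], word, none)
                else (tokens, word, some (q ++ [c]))
    | none =>
      if c = '\'' then
        ((match word with | some w => tokens ++ [String.mk w] | none => tokens), none, some [])
      else if c = ' ' then
        ((match word with | some w => tokens ++ [String.mk w] | none => tokens), none, none)
      else
        (tokens, some ((word.getD []) ++ [c]), none)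

def tokFinB (st : List String × Option (List Char) × Option (List Char)) : List String :=
  match st with
  | (tokens, word, quote) =>
    match quote with
    | some _ => tokens      -- Python raises ValueError here (excluded by Pre_)
    | none => match word with | some w => tokens ++ [String.mk w] | none => tokens

def tokenizar_rhs_py_alt (rhs : String) (numero_linea : Int) : List String :=
  tokFinB (rhs.toList.foldl tokStepB ([], none, none))

-- ===== PRECONDITION & SPEC =====
-- A raises ValueError exactly when rhs contains an odd number of single quotes (an unclosed
-- quote); B raises the identical error there, so Pre_ excludes exactly the raising inputs.
def Pre_tokenizar_rhs_py (rhs : String) (numero_linea : Int) : Prop :=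
  rhs.toList.count '\'' % 2 = 0
instance (rhs : String) (numero_linea : Int) : Decidable (Pre_tokenizar_rhs_py rhs numero_linea) := by unfold Pre_tokenizar_rhs_py; infer_instance

def pvWitness_tokenizar_rhs_py : String × Int := ("S 'a b' '' x+1", 7)

def Spec_tokenizar_rhs_py (rhs : String) (numero_linea : Int) (out : List String) : Prop := out = tokenizar_rhs_py_alt rhs numero_linea
instance (rhs : String) (numero_linea : Int) (out : List String) : Decidable (Spec_tokenizar_rhs_py rhs numero_linea out) := by unfold Spec_tokenizar_rhs_py; infer_instance

-- ===== CLAIM (what is proved, stated in full; the proofs are below) =====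
def Claim_equal_tokenizar_rhs_py : Prop := ∀ (rhs : String) (numero_linea : Int), Dom_tokenizar_rhs_py rhs numero_linea → Pre_tokenizar_rhs_py rhs numero_linea → Spec_tokenizar_rhs_py rhs numero_linea (tokenizar_rhs_py rhs numero_linea)

-- ===== LEMMAS AND PROOFS =====

-- B's run from a clean state, as a function of the remaining characters and the tokens so far.
def tokRunB (l : List Char) (tokens : List String) : List String :=
  tokFinB (l.foldl tokStepB (tokens, none, none))

-- unfolding equations for A's dependent-match recursion
theorem tokAuxA_nil (tokens : List String) : tokAuxA [] tokens = tokens := by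
  rw [tokAuxA]

theorem tokAuxA_quote (rest : List Char) (d : Char) (r : List Char)
    (hdr : rest.dropWhile (· ≠ '\'') = d :: r) (tokens : List String) :
    tokAuxA ('\'' :: rest) tokens
      = tokAuxA r (tokens ++ [String.mk (rest.takeWhile (· ≠ '\''))]) := by
  rw [tokAuxA, if_pos rfl]
  split
  · next heq => rw [hdr] at heq; simp at heq
  · next d' r' heq =>
      rw [hdr] at heq
      injection heq with h1 h2
      subst h2; rfl

theorem tokAuxA_space (rest : List Char) (tokens : List String) :
    tokAuxA (' ' :: rest) tokens = tokAuxA rest tokens := by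
  rw [tokAuxA, if_neg (by decide), if_pos rfl]

theorem tokAuxA_word (c : Char) (rest : List Char) (hq : ¬ c = '\'') (hs : ¬ c = ' ')
    (tokens : List String) :
    tokAuxA (c :: rest) tokens
      = tokAuxA ((c :: rest).dropWhile (fun ch => ch ≠ ' ' && ch ≠ '\''))
          (tokens ++ [String.mk ((c :: rest).takeWhile (fun ch => ch ≠ ' ' && ch ≠ '\''))]) := by
  rw [tokAuxA, if_neg hq, if_neg hs]

-- foldl over a quote-free segment while inside a quote just accumulates it
theorem foldB_in_quote (seg : List Char) (hseg : ∀ c ∈ seg, c ≠ '\'')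
    (tokens : List String) (w : Option (List Char)) (q : List Char) :
    seg.foldl tokStepB (tokens, w, some q) = (tokens, w, some (q ++ seg)) := by
  induction seg generalizing q with
  | nil => simp
  | cons c cs ih =>
    have hc : c ≠ '\'' := hseg c (by simp)
    simp only [List.foldl_cons, tokStepB, if_neg hc]
    rw [ih (fun c hc => hseg c (by simp [hc]))]
    simp

-- foldl over a space-free quote-free segment while inside a word accumulates it
theorem foldB_in_word (seg : List Char) (hseg : ∀ c ∈ seg, c ≠ ' ' ∧ c ≠ '\'')
    (tokens : List String) (w : List Char) :
    seg.foldl tokStepB (tokens, some w, none) = (tokens, some (w ++ seg), none) := by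
  induction seg generalizing w with
  | nil => simp
  | cons c cs ih =>
    obtain ⟨hs, hq⟩ := hseg c (by simp)
    simp only [List.foldl_cons, tokStepB, if_neg hq, if_neg hs, Option.getD_some]
    rw [ih (fun c hc => hseg c (by simp [hc]))]
    simp

theorem count_pos_of_odd {l : List Char} (h : l.count '\'' % 2 = 1) : '\'' ∈ l := by
  by_contra hmem
  rw [List.count_eq_zero_of_not_mem hmem] at h
  simp at h

-- Main invariant: on inputs with an even number of quotes, A's index machine and B's state
-- machine produce the same tokens from any accumulator.
theorem tokAux_eq_aux (n : Nat) : ∀ (l : List Char), l.length ≤ n → ∀ (tokens : List String),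
    l.count '\'' % 2 = 0 → tokAuxA l tokens = tokRunB l tokens := by
  induction n with
  | zero =>
    intro l hl tokens _
    have : l = [] := List.eq_nil_of_length_eq_zero (by omega)
    subst this
    simp [tokAuxA_nil, tokRunB, tokFinB]
  | succ n ihn =>
  intro l hl tokens hev
  have ih : ∀ (m : List Char), m.length < l.length → ∀ (tokens : List String),
      m.count '\'' % 2 = 0 → tokAuxA m tokens = tokRunB m tokens := by
    intro m hm t hme
    exact ihn m (by omega) t hme
  match l with
  | [] => simp [tokAuxA_nil, tokRunB, tokFinB]
  | c :: rest =>
    by_cases hq : c = '\''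
    · subst hq
      -- rest contains a closing quote
      have hodd : rest.count '\'' % 2 = 1 := by
        simp at hev; omega
      have hmem : '\'' ∈ rest := count_pos_of_odd hodd
      have hd : rest.dropWhile (· ≠ '\'') ≠ [] := by
        intro hnil
        have h2 := List.dropWhile_eq_nil_iff.mp hnil '\'' hmem
        simp at h2
      obtain ⟨d, r, hdr⟩ := List.exists_cons_of_ne_nil hd
      have hdq : d = '\'' := by
        have h2 := List.head_dropWhile_not (p := (· ≠ '\'')) (l := rest) hd
        have h3 : (rest.dropWhile (· ≠ '\'')).head hd = d := by
          simp only [hdr, List.head_cons]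
        rw [h3] at h2
        simpa using h2
      subst hdq
      have hsplit : rest = rest.takeWhile (· ≠ '\'') ++ '\'' :: r := by
        conv_lhs => rw [← List.takeWhile_append_dropWhile (p := (· ≠ '\'')) (l := rest)]
        rw [hdr]
      have hseg : ∀ x ∈ rest.takeWhile (· ≠ '\''), x ≠ '\'' := by
        intro x hx
        simpa using List.mem_takeWhile_imp hx
      have hseg0 : (rest.takeWhile (· ≠ '\'')).count '\'' = 0 :=
        List.count_eq_zero_of_not_mem (fun hm => hseg _ hm rfl)
      have hrev : r.count '\'' % 2 = 0 := by
        have hcnt : rest.count '\''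
            = (rest.takeWhile (· ≠ '\'')).count '\'' + ('\'' :: r).count '\'' := by
          conv_lhs => rw [hsplit]
          rw [List.count_append]
        rw [hseg0] at hcnt
        simp at hcnt
        omega
      have hlen : r.length < (('\'' : Char) :: rest).length := by
        have := congrArg List.length hsplit
        simp at this ⊢; omega
      rw [tokAuxA_quote rest '\'' r hdr tokens]
      rw [ih r hlen _ hrev]
      unfold tokRunB
      conv_rhs => rw [hsplit]
      rw [List.foldl_cons]
      have hstep1 : tokStepB (tokens, none, none) '\'' = (tokens, none, some []) := by
        simp [tokStepB]
      rw [hstep1, List.foldl_append, foldB_in_quote _ hseg, List.foldl_cons]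
      have hstep2 : tokStepB (tokens, none, some ([] ++ rest.takeWhile (· ≠ '\''))) '\''
          = (tokens ++ [String.mk (rest.takeWhile (· ≠ '\''))], none, none) := by
        simp [tokStepB]
      rw [hstep2]
    · by_cases hs : c = ' '
      · subst hs
        rw [tokAuxA_space]
        have hev' : rest.count '\'' % 2 = 0 := by
          simpa [List.count_cons] using hev
        rw [ih rest (by simp) _ hev']
        unfold tokRunB
        rw [List.foldl_cons]
        have hstep : tokStepB (tokens, none, none) ' ' = (tokens, none, none) := by
          simp [tokStepB]
        rw [hstep]
      · -- word branch
        set p : Char → Bool := fun ch => ch ≠ ' ' && ch ≠ '\'' with hp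
        have hpc : p c = true := by simp [hp, hs, hq]
        have hsplit : c :: rest = (c :: rest).takeWhile p ++ (c :: rest).dropWhile p :=
          (List.takeWhile_append_dropWhile).symm
        set w := (c :: rest).takeWhile p with hw
        set r2 := (c :: rest).dropWhile p with hr2
        have hwne : w ≠ [] := by
          simp [hw, hpc]
        have hwprop : ∀ x ∈ w, x ≠ ' ' ∧ x ≠ '\'' := by
          intro x hx
          have := List.mem_takeWhile_imp hx
          simp [hp] at this; exact this
        have hwq0 : w.count '\'' = 0 :=
          List.count_eq_zero_of_not_mem (fun hm => (hwprop _ hm).2 rfl)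
        have hr2ev : r2.count '\'' % 2 = 0 := by
          have hcnt : (c :: rest).count '\'' = w.count '\'' + r2.count '\'' := by
            conv_lhs => rw [hsplit]
            rw [List.count_append]
          rw [hwq0] at hcnt; omega
        have hr2len : r2.length < (c :: rest).length := by
          have := congrArg List.length hsplit
          obtain ⟨x, xs, hx⟩ := List.exists_cons_of_ne_nil hwne
          rw [hx] at this
          simp at this ⊢; omega
        rw [tokAuxA_word c rest hq hs tokens, ← hp, ← hw, ← hr2]
        -- B side: run over w first (accumulating the word), then over r2
        have hB : tokRunB (c :: rest) tokens
            = tokFinB (r2.foldl tokStepB (tokens, some w, none)) := by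
          unfold tokRunB
          conv_lhs => rw [hsplit]
          rw [List.foldl_append]
          obtain ⟨x, xs, hx⟩ := List.exists_cons_of_ne_nil hwne
          rw [hx, List.foldl_cons]
          have hx1 : x ≠ ' ' ∧ x ≠ '\'' := hwprop x (by simp [hx])
          have hstepx : tokStepB (tokens, none, none) x = (tokens, some [x], none) := by
            simp [tokStepB, hx1.1, hx1.2]
          rw [hstepx, foldB_in_word xs (fun y hy => hwprop y (by simp [hx, hy]))]
          simp
        rw [hB]
        -- now case on r2: empty, space-headed, or quote-headed
        match hm : r2 with
        | [] =>
          simp [tokAuxA_nil, tokFinB]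
        | d :: r3 =>
          have hdp : p d = false := by
            have hne : (c :: rest).dropWhile p ≠ [] := by rw [← hr2]; simp
            have h2 := List.head_dropWhile_not (p := p) (l := c :: rest) hne
            have h3 : ((c :: rest).dropWhile p).head hne = d := by
              simp only [← hr2, List.head_cons]
            rw [h3] at h2
            simpa using h2
          have hd2 : d = ' ' ∨ d = '\'' := by
            simp [hp] at hdp
            by_cases h1 : d = ' '
            · exact Or.inl h1
            · exact Or.inr (hdp h1)
          have hr3ev' : (d :: r3).count '\'' % 2 = 0 := hr2ev
          have hlen3 : (d :: r3).length < (c :: rest).length := hr2len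
          rw [List.foldl_cons]
          rcases hd2 with hd | hd
          · subst hd
            have hstep : tokStepB (tokens, some w, none) ' '
                = (tokens ++ [String.mk w], none, none) := by simp [tokStepB]
            rw [hstep]
            have hA : tokAuxA (' ' :: r3) (tokens ++ [String.mk w])
                = tokAuxA r3 (tokens ++ [String.mk w]) := tokAuxA_space _ _
            rw [hA]
            have hr3ev : r3.count '\'' % 2 = 0 := by
              simpa [List.count_cons] using hr3ev'
            rw [ih r3 (by calc r3.length < (' ' :: r3).length := by simp
                            _ < (c :: rest).length := hlen3) _ hr3ev]
            rfl
          · subst hd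
            have hstep : tokStepB (tokens, some w, none) '\''
                = (tokens ++ [String.mk w], none, some []) := by simp [tokStepB]
            rw [hstep]
            rw [ih ('\'' :: r3) hlen3 (tokens ++ [String.mk w]) hr3ev']
            unfold tokRunB
            rw [List.foldl_cons]
            have hstep2 : tokStepB (tokens ++ [String.mk w], none, none) '\''
                = (tokens ++ [String.mk w], none, some []) := by simp [tokStepB]
            rw [hstep2]

-- ===== VERDICT (by name: the statement is the Claim_ definition above) =====
theorem tokenizar_rhs_py_spec : Claim_equal_tokenizar_rhs_py := by
  intro rhs numero_linea _ hpre
  unfold Spec_tokenizar_rhs_py tokenizar_rhs_py tokenizar_rhs_py_alt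
  exact tokAux_eq_aux rhs.toList.length rhs.toList le_rfl [] hpre
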